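-- pv_equiv track=rewrite | github.com/menisadi/pydp | src/qualities.py | bulk_quality_minmax
-- ===== SOURCE A (Python) =====
-- from collections import deque, Counter
--
-- def bulk_quality_minmax(data, domain):
--     """
--     sensitivity-1 bulk quality function
--     used to find a minmax or median for the data
--     bulk_quality_minmax( data , domain )
--     :return: the minimum between the amount of data above the element and the data below
--     """
--     greater_than = len(data)
--     less_than = 0
--     domain_que = deque(sorted(data))
--     qualities = []
--     data_next = min(domain) - 1
--     while len(domain_que) > 0:
--         data_prev = data_next
--         data_next = domain_que.popleft()
--         qualities.append([min(greater_than, less_than)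
--                           for i in domain if data_prev < i <= data_next])
--         greater_than -= 1
--         less_than += 1
--     qualities.append([min(greater_than, less_than)
--                       for i in domain if data_next < i])
--     # qualities is a list of lists of qualities so:
--     # return flatted qualities list
--     return [item for sub_list in qualities for item in sub_list]
-- ===== SOURCE B (Python) =====
-- from bisect import bisect_left
--
--
-- def bulk_quality_minmax(data, domain):
--     """
--     sensitivity-1 bulk quality function: for each domain element, the quality is
--     min(#data strictly below it viewed one way, #data at-or-above) = min(n - p, p)
--     where p = bisect_left(sorted(data), element); the output lists qualities in
--     increasing order of p (which is exactly A's interval grouping).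
--     """
--     s = sorted(data)
--     n = len(s)
--     positions = sorted(bisect_left(s, i) for i in domain)
--     return [min(n - p, p) for p in positions]
-- ===== Notes on version B (the rewrite author's own statement) =====
-- stated objective: faster
-- what changed: Replaces the O(n*d) popleft-loop that rescans the whole domain per sorted data element with sort + binary search: quality of a domain element is min(n-p, p) for p = bisect_left(sorted(data), element), and the outputs are emitted by sorting the p values (exactly A's interval grouping, since equal p give equal qualities).
-- crash fix: On an empty domain A raises ValueError (min of empty sequence) while B returns []. — e.g. on bulk_quality_minmax([1, 2], []): A raises ValueError, B returns []
import Mathlib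
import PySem

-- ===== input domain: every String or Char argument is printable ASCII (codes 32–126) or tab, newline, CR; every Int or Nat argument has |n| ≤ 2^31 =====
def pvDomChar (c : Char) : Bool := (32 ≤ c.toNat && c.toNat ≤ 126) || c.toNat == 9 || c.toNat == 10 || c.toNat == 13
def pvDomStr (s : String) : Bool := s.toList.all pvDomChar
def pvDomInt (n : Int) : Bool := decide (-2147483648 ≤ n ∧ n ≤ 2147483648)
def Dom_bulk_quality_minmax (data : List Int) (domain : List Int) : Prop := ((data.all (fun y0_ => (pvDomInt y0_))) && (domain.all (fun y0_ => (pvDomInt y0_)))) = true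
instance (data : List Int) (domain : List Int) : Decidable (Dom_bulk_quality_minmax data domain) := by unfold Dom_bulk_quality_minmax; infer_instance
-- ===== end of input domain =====

-- B replaces A's per-data-element rescans of the whole domain by sort + bisect_left
-- (quality = min(n-p, p), output in increasing order of p): asymptotically faster.


-- ===== PORT A =====
-- the while loop over the deque of sorted data: state (greater_than, less_than, data_next);
-- each step appends the bucket [min(g,l) for i in domain if data_prev < i <= data_next],
-- and after the loop the tail bucket [min(g,l) for i in domain if data_next < i].
def pvBuckets (domain : List Int) : List Int → Int → Int → Int → List (List Int)
  | [], g, l, data_next =>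
      [(domain.filter (fun i => decide (data_next < i))).map (fun _ => min g l)]
  | d :: rest, g, l, data_prev =>
      ((domain.filter (fun i => decide (data_prev < i) && decide (i ≤ d))).map (fun _ => min g l))
        :: pvBuckets domain rest (g - 1) (l + 1) d

def bulk_quality_minmax (data : List Int) (domain : List Int) : List Int :=
  let greater_than : Int := data.length
  let less_than : Int := 0
  let domain_que := PySem.List.sorted data (fun x => x)
  -- min(domain) raises ValueError on empty domain: excluded by Pre_; the .getD 0 is never reached there
  let data_next : Int := ((PySem.List.min? domain (fun x => x)).getD 0) - 1
  (pvBuckets domain domain_que greater_than less_than data_next).flatten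

-- ===== PORT B =====
def bulk_quality_minmax_alt (data : List Int) (domain : List Int) : List Int :=
  let s := PySem.List.sorted data (fun x => x)
  let n : Int := s.length
  let positions := PySem.List.sorted (domain.map (fun i => (PySem.List.bisectLeft s i : Int))) (fun x => x)
  positions.map (fun p => min (n - p) p)

-- ===== PRECONDITION & SPEC =====
-- A evaluates min(domain), which raises ValueError on an empty domain; only that is excluded.
def Pre_bulk_quality_minmax (data : List Int) (domain : List Int) : Prop := domain ≠ []
instance (data : List Int) (domain : List Int) : Decidable (Pre_bulk_quality_minmax data domain) := by unfold Pre_bulk_quality_minmax; infer_instance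
def pvWitness_bulk_quality_minmax : List Int × List Int := ([3, 1, 2], [0, 2, 2, 5])

-- On an empty domain A raises ValueError (min of empty sequence) while B returns [].
def Raises_bulk_quality_minmax (data : List Int) (domain : List Int) : Prop := domain = []
instance (data : List Int) (domain : List Int) : Decidable (Raises_bulk_quality_minmax data domain) := by unfold Raises_bulk_quality_minmax; infer_instance
def pvRaiseWitness_bulk_quality_minmax : List Int × List Int := ([1, 2], [])
def pvRaiseWitnessOut_bulk_quality_minmax : List Int := []

def Spec_bulk_quality_minmax (data : List Int) (domain : List Int) (out : List Int) : Prop := out = bulk_quality_minmax_alt data domain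
instance (data : List Int) (domain : List Int) (out : List Int) : Decidable (Spec_bulk_quality_minmax data domain out) := by unfold Spec_bulk_quality_minmax; infer_instance

-- ===== CLAIM (what is proved, stated in full; the proofs are below) =====
def Claim_equal_bulk_quality_minmax : Prop := ∀ (data : List Int) (domain : List Int), Dom_bulk_quality_minmax data domain → Pre_bulk_quality_minmax data domain → Spec_bulk_quality_minmax data domain (bulk_quality_minmax data domain)
def Claim_raises_bulk_quality_minmax : Prop := (∀ (data : List Int) (domain : List Int), Dom_bulk_quality_minmax data domain → Raises_bulk_quality_minmax data domain → ¬ Pre_bulk_quality_minmax data domain) ∧ (Dom_bulk_quality_minmax (pvRaiseWitness_bulk_quality_minmax.1) (pvRaiseWitness_bulk_quality_minmax.2) ∧ Raises_bulk_quality_minmax (pvRaiseWitness_bulk_quality_minmax.1) (pvRaiseWitness_bulk_quality_minmax.2) ∧ bulk_quality_minmax_alt (pvRaiseWitness_bulk_quality_minmax.1) (pvRaiseWitness_bulk_quality_minmax.2) = pvRaiseWitnessOut_bulk_quality_minmax)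

-- ===== LEMMAS AND PROOFS =====

-- countP (· < i) of a sorted cons: 0 when i is at or below the head …
theorem pvCountP_cons_le (d : Int) (rest : List Int) (hd : ∀ r ∈ rest, d ≤ r) (i : Int)
    (hi : i ≤ d) : (d :: rest).countP (fun a => decide (a < i)) = 0 := by
  rw [List.countP_eq_zero]
  intro a ha
  simp only [List.mem_cons] at ha
  rcases ha with rfl | ha
  · simpa using not_lt.mpr hi
  · have := hd a ha; simp; omega

-- … and one more than the tail's count when i is above the head
theorem pvCountP_cons_gt (d : Int) (rest : List Int) (i : Int) (hi : d < i) :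
    (d :: rest).countP (fun a => decide (a < i)) = rest.countP (fun a => decide (a < i)) + 1 := by
  rw [List.countP_cons]
  simp [hi]

-- bisect_left on a sorted list counts the elements strictly below x
theorem pvBisect_eq_countP (s : List Int) (hs : s.Pairwise (· ≤ ·)) (x : Int) :
    PySem.List.bisectLeft s x = s.countP (fun a => decide (a < x)) := by
  obtain ⟨hle, hlt, hge⟩ := PySem.List.bisectLeft_spec s x hs
  set b := PySem.List.bisectLeft s x with hb
  have hsplit : s = s.take b ++ s.drop b := (List.take_append_drop b s).symm
  rw [hsplit, List.countP_append]
  have h1 : (s.take b).countP (fun a => decide (a < x)) = (s.take b).length := by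
    rw [List.countP_eq_length]
    intro a ha
    rw [List.mem_iff_getElem] at ha
    obtain ⟨j, hj, rfl⟩ := ha
    rw [List.getElem_take]
    exact decide_eq_true (hlt j (by simp at hj; omega) (by simp at hj; omega))
  have h2 : (s.drop b).countP (fun a => decide (a < x)) = 0 := by
    rw [List.countP_eq_zero]
    intro a ha
    rw [List.mem_iff_getElem] at ha
    obtain ⟨j, hj, rfl⟩ := ha
    rw [List.getElem_drop]
    simp only [decide_eq_true_eq, not_lt]
    exact hge (b + j) (by simp at hj; omega) (by omega)
  rw [h1, h2, List.length_take]
  omega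

-- loop invariant: A's flattened buckets over a sorted suffix s are the sorted
-- strictly-below counts of the still-pending domain elements, mapped through min (g-p, l+p)
theorem pvMain (domain : List Int) (s : List Int) (g l prev : Int)
    (hs : s.Pairwise (· ≤ ·))
    (hprev : ∀ i ∈ domain, ∀ x ∈ s, x < i → prev < i) :
    (pvBuckets domain s g l prev).flatten
      = (PySem.List.sorted
          ((domain.filter (fun i => decide (prev < i))).map
            (fun i => (s.countP (fun a => decide (a < i)) : Int)))
          (fun x => x)).map (fun p => min (g - p) (l + p)) := by
  induction s generalizing g l prev with
  | nil =>
      have hz : (domain.filter (fun i => decide (prev < i))).map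
          (fun i => (([] : List Int).countP (fun a => decide (a < i)) : Int))
          = (domain.filter (fun i => decide (prev < i))).map (fun _ => (0 : Int)) := by
        simp
      rw [pvBuckets, hz, PySem.List.sorted_id_eq_of_perm_of_pairwise _ _ (List.Perm.refl _)
        (by rw [List.pairwise_map]; exact List.pairwise_of_forall (fun _ _ => le_refl 0))]
      simp
  | cons d rest ih =>
      have hd : ∀ r ∈ rest, d ≤ r := (List.pairwise_cons.mp hs).1
      have hrest : rest.Pairwise (· ≤ ·) := (List.pairwise_cons.mp hs).2
      set pF : Int → Int := fun i => ((d :: rest).countP (fun a => decide (a < i)) : Int) with hpF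
      set pR : Int → Int := fun i => (rest.countP (fun a => decide (a < i)) : Int) with hpR
      set D1 := domain.filter (fun i => decide (prev < i) && decide (i ≤ d)) with hD1
      set D2 := domain.filter (fun i => decide (d < i)) with hD2
      set D' := domain.filter (fun i => decide (prev < i)) with hD'
      have key : PySem.List.sorted (D'.map pF) (fun x => x)
          = D1.map (fun _ => (0 : Int)) ++ (PySem.List.sorted (D2.map pR) (fun x => x)).map (· + 1) := by
        apply PySem.List.sorted_id_eq_of_perm_of_pairwise
        · -- it is a permutation of the unsorted count list
          have h1 : (PySem.List.sorted (D2.map pR) (fun x => x)).map (· + 1) |>.Perm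
              ((D2.map pR).map (· + 1)) :=
            (PySem.List.sorted_perm (D2.map pR) (fun x => x) false).map _
          have hmap1 : D1.map (fun _ => (0 : Int)) = D1.map pF := by
            apply List.map_congr_left
            intro i hi
            rw [hD1, List.mem_filter] at hi
            have h2 := of_decide_eq_true (Bool.and_elim_right hi.2)
            simp only [hpF]
            rw [pvCountP_cons_le d rest hd i h2]
            simp
          have hmap2 : (D2.map pR).map (· + 1) = D2.map pF := by
            rw [List.map_map]
            apply List.map_congr_left
            intro i hi
            rw [hD2, List.mem_filter] at hi
            have h2 := of_decide_eq_true hi.2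
            simp only [hpF, hpR, Function.comp]
            rw [pvCountP_cons_gt d rest i h2]
            push_cast
            ring
          have hsplit : (D1 ++ D2).Perm D' := by
            have hperm := List.filter_append_perm (fun i => decide (i ≤ d)) D'
            have e1 : D'.filter (fun i => decide (i ≤ d)) = D1 := by
              rw [hD', List.filter_filter, hD1]
              apply List.filter_congr
              intro i _
              rw [Bool.and_comm]
            have e2 : D'.filter (fun i => !decide (i ≤ d)) = D2 := by
              rw [hD', List.filter_filter, hD2]
              apply List.filter_congr
              intro i hi
              by_cases h : d < i
              · have := hprev i hi d (List.mem_cons_self) h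
                simp [h, this, not_le.mpr h]
              · simp [h, not_lt.mp h]
            rw [e1, e2] at hperm
            exact hperm
          refine ((List.Perm.refl (D1.map (fun _ => (0:Int)))).append h1).trans ?_
          rw [hmap1, hmap2, ← List.map_append]
          exact hsplit.map pF
        · -- and it is nondecreasing: zeros, then the sorted tail counts shifted by one
          rw [List.pairwise_append]
          refine ⟨?_, ?_, ?_⟩
          · rw [List.pairwise_map]; exact List.pairwise_of_forall (fun _ _ => le_refl 0)
          · rw [List.pairwise_map]
            exact (PySem.List.sorted_pairwise (D2.map pR) (fun x => x)).imp (by intro a b h; omega)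
          · intro a ha b hb
            simp only [List.mem_map] at ha hb
            obtain ⟨_, _, rfl⟩ := ha
            obtain ⟨q, hq, rfl⟩ := hb
            rw [PySem.List.mem_sorted, List.mem_map] at hq
            obtain ⟨i, _, rfl⟩ := hq
            simp only [hpR]
            positivity
      show (D1.map (fun _ => min g l)) ++ (pvBuckets domain rest (g - 1) (l + 1) d).flatten = _
      rw [ih (g - 1) (l + 1) d hrest
        (fun i hi x hx hxi => lt_of_le_of_lt (hd x hx) hxi), key, List.map_append, List.map_map, List.map_map]
      congr 1
      · apply List.map_congr_left; intro i _; simp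
      · apply List.map_congr_left; intro p _
        simp only [Function.comp]
        congr 1 <;> ring

-- ===== VERDICT (by name: the statement is the Claim_ definition above) =====
theorem bulk_quality_minmax_spec : Claim_equal_bulk_quality_minmax := by
  intro data domain _ hpre
  unfold Spec_bulk_quality_minmax bulk_quality_minmax bulk_quality_minmax_alt
  set S := PySem.List.sorted data (fun x => x) with hSdef
  have hS : S.Pairwise (· ≤ ·) := PySem.List.sorted_pairwise data (fun x => x)
  obtain ⟨m, hm⟩ : ∃ m, PySem.List.min? domain (fun x => x) = some m := by
    cases h : PySem.List.min? domain (fun x => x) with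
    | none => exact absurd ((PySem.List.min?_eq_none_iff domain _).mp h) hpre
    | some m => exact ⟨m, rfl⟩
  have hmin : ∀ i ∈ domain, m ≤ i := PySem.List.min?_isMin hm
  rw [hm]
  simp only [Option.getD_some]
  rw [pvMain domain S (data.length) 0 (m - 1) hS
    (fun i hi x _ _ => by have := hmin i hi; omega)]
  have hfilter : domain.filter (fun i => decide (m - 1 < i)) = domain :=
    List.filter_eq_self.mpr (fun i hi => decide_eq_true (by have := hmin i hi; omega))
  rw [hfilter]
  have hlen : ((S.length : Int)) = (data.length : Int) := by
    rw [hSdef, PySem.List.length_sorted]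
  have hbis : domain.map (fun i => (PySem.List.bisectLeft S i : Int))
      = domain.map (fun i => (S.countP (fun a => decide (a < i)) : Int)) :=
    List.map_congr_left (fun i _ => by rw [pvBisect_eq_countP S hS i])
  rw [hbis, hlen]
  apply List.map_congr_left
  intro p _
  rw [zero_add]

theorem bulk_quality_minmax_raises : Claim_raises_bulk_quality_minmax := by
  unfold Claim_raises_bulk_quality_minmax
  exact ⟨fun _ _ _ h => by simpa [Pre_bulk_quality_minmax] using h, by decide⟩

-- self-check: B's port really returns the stated literal at the raise witness
theorem pvRaiseOut_ok_witness :
    bulk_quality_minmax_alt (pvRaiseWitness_bulk_quality_minmax.1) (pvRaiseWitness_bulk_quality_minmax.2)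
      = pvRaiseWitnessOut_bulk_quality_minmax :=
  bulk_quality_minmax_raises.2.2.2
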